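-- pv_equiv track=rewrite | github.com/qibinc/Kick-Start | 2019_Round_G/shifts.py | dfs
-- ===== SOURCE A (Python) =====
-- def dfs(n, h, a, b, suffix_sum_a, suffix_sum_b, i, h_a, h_b):
--     if i == n:
--         if h_a >= h and h_b >= h:
--             return 1
--         else:
--             return 0
--
--     cnt = 0
--     if h_a + suffix_sum_a[i] >= h and h_b + suffix_sum_b[i] - b[i] >= h:
--         cnt += dfs(n, h, a, b, suffix_sum_a, suffix_sum_b, i + 1, h_a + a[i], h_b)
--     if h_a + suffix_sum_a[i] - a[i] >= h and h_b + suffix_sum_b[i] >= h: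
--         cnt += dfs(n, h, a, b, suffix_sum_a, suffix_sum_b, i + 1, h_a, h_b + b[i])
--     cnt += dfs(n, h, a, b, suffix_sum_a, suffix_sum_b, i + 1, h_a + a[i], h_b + b[i])
--     return cnt
-- ===== SOURCE B (Python) =====
-- def dfs(n, h, a, b, suffix_sum_a, suffix_sum_b, i, h_a, h_b):
--     # Level-by-level counting DP: a dict maps each reachable (h_a, h_b) state
--     # to the number of assignment paths reaching it, instead of recursing per path.
--     states = {(h_a, h_b): 1}
--     for j in range(i, n):
--         aj, bj = a[j], b[j]
--         nxt = {}
--         for (x, y), c in states.items():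
--             if x + suffix_sum_a[j] >= h and y + suffix_sum_b[j] - bj >= h:
--                 k = (x + aj, y)
--                 nxt[k] = nxt.get(k, 0) + c
--             if x + suffix_sum_a[j] - aj >= h and y + suffix_sum_b[j] >= h:
--                 k = (x, y + bj)
--                 nxt[k] = nxt.get(k, 0) + c
--             k = (x + aj, y + bj)
--             nxt[k] = nxt.get(k, 0) + c
--         states = nxt
--     return sum(c for (x, y), c in states.items() if x >= h and y >= h)
-- ===== Notes on version B (the rewrite author's own statement) =====
-- stated objective: alternative
-- what changed: Replaces the per-path ternary recursion with an iterative level-by-level DP that keeps a dict counting paths per (h_a, h_b) state, merging identical states so duplicate-heavy inputs collapse; the final answer is a sum over the surviving states.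
-- outside the precondition, e.g. on dfs(1, 1, [0], [0], [0], [], 0, 0, 0): A returns 0, B returns 0
import Mathlib
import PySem

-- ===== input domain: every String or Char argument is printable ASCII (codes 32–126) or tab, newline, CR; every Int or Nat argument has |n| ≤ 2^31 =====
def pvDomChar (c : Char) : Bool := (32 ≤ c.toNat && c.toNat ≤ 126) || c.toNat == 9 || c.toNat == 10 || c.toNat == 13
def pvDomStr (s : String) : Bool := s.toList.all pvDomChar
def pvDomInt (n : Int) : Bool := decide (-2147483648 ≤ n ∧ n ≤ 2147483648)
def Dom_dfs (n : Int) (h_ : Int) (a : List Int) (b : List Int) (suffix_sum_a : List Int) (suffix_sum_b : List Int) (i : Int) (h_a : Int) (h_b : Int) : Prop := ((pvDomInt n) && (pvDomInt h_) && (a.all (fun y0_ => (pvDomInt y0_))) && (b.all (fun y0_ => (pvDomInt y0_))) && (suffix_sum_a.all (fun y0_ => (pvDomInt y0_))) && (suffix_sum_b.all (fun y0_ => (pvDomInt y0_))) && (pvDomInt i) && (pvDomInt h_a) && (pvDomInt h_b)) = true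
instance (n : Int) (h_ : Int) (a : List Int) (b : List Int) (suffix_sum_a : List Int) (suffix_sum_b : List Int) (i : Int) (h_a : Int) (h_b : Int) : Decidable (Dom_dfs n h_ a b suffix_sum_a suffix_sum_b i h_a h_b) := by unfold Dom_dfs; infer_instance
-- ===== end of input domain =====

-- B replaces A's per-path ternary recursion by an iterative level DP over a dict
-- counting paths per (h_a, h_b) state (objective: alternative algorithm, same worst-case cost).

-- ===== PORT A =====
-- fuel = (n - i).toNat counts the remaining recursion depth; under Pre_ (i ≤ n) it is exact.
def dfsAux (n : Int) (h_ : Int) (a : List Int) (b : List Int) (sa : List Int) (sb : List Int) : Nat → Int → Int → Int → Int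
  | fuel, i, h_a, h_b =>
    if i = n then (if h_a ≥ h_ ∧ h_b ≥ h_ then 1 else 0)
    else
      match fuel with
      | 0 => 0  -- unreachable under Pre_ (Python would recurse past every index)
      | fuel' + 1 =>
        match PySem.List.pyGet? a i, PySem.List.pyGet? b i, PySem.List.pyGet? sa i, PySem.List.pyGet? sb i with
        | some ai, some bi, some sai, some sbi =>
          (if h_a + sai ≥ h_ ∧ h_b + sbi - bi ≥ h_
            then dfsAux n h_ a b sa sb fuel' (i + 1) (h_a + ai) h_b else 0)
          + (if h_a + sai - ai ≥ h_ ∧ h_b + sbi ≥ h_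
            then dfsAux n h_ a b sa sb fuel' (i + 1) h_a (h_b + bi) else 0)
          + dfsAux n h_ a b sa sb fuel' (i + 1) (h_a + ai) (h_b + bi)
        | _, _, _, _ => 0  -- an index is out of range: Python raises IndexError here (excluded by Pre_)

def dfs (n : Int) (h_ : Int) (a : List Int) (b : List Int) (suffix_sum_a : List Int) (suffix_sum_b : List Int) (i : Int) (h_a : Int) (h_b : Int) : Int :=
  dfsAux n h_ a b suffix_sum_a suffix_sum_b ((n - i).toNat) i h_a h_b

-- ===== PORT B =====
-- one level of Source B's loop body: fold over the current states dict, building the next dict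
def dfsStep (n : Int) (h_ : Int) (a : List Int) (b : List Int) (sa : List Int) (sb : List Int) (st : PySem.Dict (Int × Int) Int) (j : Int) : PySem.Dict (Int × Int) Int :=
  let aj := PySem.List.pyGetD a j 0
  let bj := PySem.List.pyGetD b j 0
  st.items.foldl (fun nxt p =>
    let x := p.1.1
    let y := p.1.2
    let c := p.2
    let nxt := if x + PySem.List.pyGetD sa j 0 ≥ h_ ∧ y + PySem.List.pyGetD sb j 0 - bj ≥ h_
      then nxt.insert (x + aj, y) (nxt.getD (x + aj, y) 0 + c) else nxt
    let nxt := if x + PySem.List.pyGetD sa j 0 - aj ≥ h_ ∧ y + PySem.List.pyGetD sb j 0 ≥ h_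
      then nxt.insert (x, y + bj) (nxt.getD (x, y + bj) 0 + c) else nxt
    nxt.insert (x + aj, y + bj) (nxt.getD (x + aj, y + bj) 0 + c)) PySem.Dict.empty

-- Source B's 'for j in range(i, n)' loop, counted by fuel = n - i; it stops where Python's
-- 'aj, bj = a[j], b[j]' raises IndexError (such inputs are excluded by Pre_)
def dfsLoop (n : Int) (h_ : Int) (a : List Int) (b : List Int) (sa : List Int) (sb : List Int) : Nat → Int → PySem.Dict (Int × Int) Int → PySem.Dict (Int × Int) Int
  | 0, _, st => st
  | fuel + 1, j, st =>
    match PySem.List.pyGet? a j, PySem.List.pyGet? b j with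
    | some _, some _ => dfsLoop n h_ a b sa sb fuel (j + 1) (dfsStep n h_ a b sa sb st j)
    | _, _ => st  -- IndexError in Python (excluded by Pre_)

def dfs_alt (n : Int) (h_ : Int) (a : List Int) (b : List Int) (suffix_sum_a : List Int) (suffix_sum_b : List Int) (i : Int) (h_a : Int) (h_b : Int) : Int :=
  let final := dfsLoop n h_ a b suffix_sum_a suffix_sum_b ((n - i).toNat) i (PySem.Dict.empty.insert (h_a, h_b) 1)
  final.items.foldl (fun s p => if p.1.1 ≥ h_ ∧ p.1.2 ≥ h_ then s + p.2 else s) 0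

-- ===== PRECONDITION & SPEC =====
-- Pre_ excludes the inputs on which Python A raises: i > n (unbounded recursion) and
-- out-of-range indices j ∈ [i, n) (IndexError).  It requires every such j to be a valid
-- Python index into all four lists; this slightly over-excludes inputs where an invalid
-- suffix_sum_b index is never read because a short-circuited guard skips it (A and B
-- still agree there).
def Pre_dfs (n : Int) (h_ : Int) (a : List Int) (b : List Int) (suffix_sum_a : List Int) (suffix_sum_b : List Int) (i : Int) (h_a : Int) (h_b : Int) : Prop :=
  i ≤ n ∧ (i < n →
    -(a.length : Int) ≤ i ∧ n ≤ (a.length : Int) ∧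
    -(b.length : Int) ≤ i ∧ n ≤ (b.length : Int) ∧
    -(suffix_sum_a.length : Int) ≤ i ∧ n ≤ (suffix_sum_a.length : Int) ∧
    -(suffix_sum_b.length : Int) ≤ i ∧ n ≤ (suffix_sum_b.length : Int))
instance (n : Int) (h_ : Int) (a : List Int) (b : List Int) (suffix_sum_a : List Int) (suffix_sum_b : List Int) (i : Int) (h_a : Int) (h_b : Int) : Decidable (Pre_dfs n h_ a b suffix_sum_a suffix_sum_b i h_a h_b) := by unfold Pre_dfs; infer_instance

def pvWitness_dfs : Int × Int × List Int × List Int × List Int × List Int × Int × Int × Int := (2, 1, [1, 1], [1, 1], [2, 1], [2, 1], 0, 0, 0)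

def Spec_dfs (n : Int) (h_ : Int) (a : List Int) (b : List Int) (suffix_sum_a : List Int) (suffix_sum_b : List Int) (i : Int) (h_a : Int) (h_b : Int) (out : Int) : Prop := out = dfs_alt n h_ a b suffix_sum_a suffix_sum_b i h_a h_b
instance (n : Int) (h_ : Int) (a : List Int) (b : List Int) (suffix_sum_a : List Int) (suffix_sum_b : List Int) (i : Int) (h_a : Int) (h_b : Int) (out : Int) : Decidable (Spec_dfs n h_ a b suffix_sum_a suffix_sum_b i h_a h_b out) := by unfold Spec_dfs; infer_instance

-- ===== CLAIM (what is proved, stated in full; the proofs are below) =====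
def Claim_equal_dfs : Prop := ∀ (n : Int) (h_ : Int) (a : List Int) (b : List Int) (suffix_sum_a : List Int) (suffix_sum_b : List Int) (i : Int) (h_a : Int) (h_b : Int), Dom_dfs n h_ a b suffix_sum_a suffix_sum_b i h_a h_b → Pre_dfs n h_ a b suffix_sum_a suffix_sum_b i h_a h_b → Spec_dfs n h_ a b suffix_sum_a suffix_sum_b i h_a h_b (dfs n h_ a b suffix_sum_a suffix_sum_b i h_a h_b)

-- ===== LEMMAS AND PROOFS =====

-- weighted sum of a states dict under a valuation g of the states
def pvW (g : Int × Int → Int) (d : PySem.Dict (Int × Int) Int) : Int :=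
  (d.items.map (fun p => p.2 * g p.1)).sum

-- A's recursion as a function of the level and the state, with its exact fuel
def pvF (n : Int) (h_ : Int) (a : List Int) (b : List Int) (sa : List Int) (sb : List Int) (j : Int) (s : Int × Int) : Int :=
  dfsAux n h_ a b sa sb ((n - j).toNat) j s.1 s.2

lemma pvW_insert_acc (g : Int × Int → Int) :
    ∀ (l : List ((Int × Int) × Int)), (l.map Prod.fst).Nodup → ∀ (k : Int × Int) (c : Int),
      pvW g ((PySem.Dict.mk l).insert k ((PySem.Dict.mk l).getD k 0 + c))
        = pvW g (PySem.Dict.mk l) + c * g k := by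
  intro l
  induction l with
  | nil =>
    intro _ k c
    simp [pvW, PySem.Dict.insert, PySem.Dict.contains, PySem.Dict.getD, PySem.Dict.get?, PySem.Dict.items]
  | cons p t ih =>
    intro hnd k c
    obtain ⟨k0, v0⟩ := p
    simp only [List.map_cons, List.nodup_cons] at hnd
    by_cases hk : k0 = k
    · subst hk
      have hmap : t.map (fun q => if q.1 == k0 then (k0, v0 + c) else q) = t := by
        rw [List.map_congr_left (g := id), List.map_id]
        intro q hq
        have : ¬ q.1 = k0 := by
          intro h
          exact hnd.1 (h ▸ List.mem_map_of_mem hq)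
        simp [this]
      simp only [PySem.Dict.insert, PySem.Dict.contains, PySem.Dict.getD, PySem.Dict.get?,
        PySem.Dict.items, List.any_cons, beq_self_eq_true, Bool.true_or, if_true,
        List.find?_cons_of_pos, List.map_cons, hmap, Option.getD_some, Option.map_some]
      simp [pvW]
      ring
    · have hne : (k0 == k) = false := by simp [hk]
      have hins : ((PySem.Dict.mk ((k0, v0) :: t)).insert k ((PySem.Dict.mk ((k0, v0) :: t)).getD k 0 + c)).items
          = (k0, v0) :: ((PySem.Dict.mk t).insert k ((PySem.Dict.mk t).getD k 0 + c)).items := by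
        simp only [PySem.Dict.insert, PySem.Dict.contains, PySem.Dict.getD, PySem.Dict.get?,
          PySem.Dict.items, List.any_cons, hne, Bool.false_or, List.find?_cons_of_neg,
          List.map_cons]
        by_cases hct : (t.any fun p => p.1 == k) = true
        · simp [hct, hne]
        · simp [hct, hne]
      have h := ih hnd.2 k c
      simp only [pvW, PySem.Dict.items, hins, List.map_cons, List.sum_cons] at h ⊢
      rw [h]
      ring
lemma pvW_insert_acc' (g : Int × Int → Int) (d : PySem.Dict (Int × Int) Int) (hd : d.keys.Nodup) (k : Int × Int) (c : Int) :
    pvW g (d.insert k (d.getD k 0 + c)) = pvW g d + c * g k := by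
  cases d with
  | mk l => exact pvW_insert_acc g l hd k c

lemma pvFoldSum (h_ : Int) :
    ∀ (l : List ((Int × Int) × Int)) (s0 : Int),
      l.foldl (fun s p => if p.1.1 ≥ h_ ∧ p.1.2 ≥ h_ then s + p.2 else s) s0
        = s0 + (l.map (fun p => p.2 * (if p.1.1 ≥ h_ ∧ p.1.2 ≥ h_ then 1 else 0))).sum := by
  intro l
  induction l with
  | nil => intro s0; simp
  | cons p t ih =>
    intro s0
    simp only [List.foldl_cons, List.map_cons, List.sum_cons, ih]
    split_ifs <;> ring

lemma pvInner (h_ aj bj saj sbj : Int) (g : Int × Int → Int) :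
    ∀ (l : List ((Int × Int) × Int)) (d : PySem.Dict (Int × Int) Int), d.keys.Nodup →
      ((l.foldl (fun nxt p =>
          let x := p.1.1
          let y := p.1.2
          let c := p.2
          let nxt := if x + saj ≥ h_ ∧ y + sbj - bj ≥ h_
            then nxt.insert (x + aj, y) (nxt.getD (x + aj, y) 0 + c) else nxt
          let nxt := if x + saj - aj ≥ h_ ∧ y + sbj ≥ h_
            then nxt.insert (x, y + bj) (nxt.getD (x, y + bj) 0 + c) else nxt
          nxt.insert (x + aj, y + bj) (nxt.getD (x + aj, y + bj) 0 + c)) d).keys.Nodup)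
      ∧ (l.foldl (fun nxt p =>
          let x := p.1.1
          let y := p.1.2
          let c := p.2
          let nxt := if x + saj ≥ h_ ∧ y + sbj - bj ≥ h_
            then nxt.insert (x + aj, y) (nxt.getD (x + aj, y) 0 + c) else nxt
          let nxt := if x + saj - aj ≥ h_ ∧ y + sbj ≥ h_
            then nxt.insert (x, y + bj) (nxt.getD (x, y + bj) 0 + c) else nxt
          nxt.insert (x + aj, y + bj) (nxt.getD (x + aj, y + bj) 0 + c)) d |> pvW g)
        = pvW g d + (l.map (fun p => p.2 *
            ((if p.1.1 + saj ≥ h_ ∧ p.1.2 + sbj - bj ≥ h_ then g (p.1.1 + aj, p.1.2) else 0)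
              + (if p.1.1 + saj - aj ≥ h_ ∧ p.1.2 + sbj ≥ h_ then g (p.1.1, p.1.2 + bj) else 0)
              + g (p.1.1 + aj, p.1.2 + bj)))).sum := by
  intro l
  induction l with
  | nil => intro d hd; exact ⟨hd, by simp⟩
  | cons p t ih =>
    intro d hd
    obtain ⟨⟨x, y⟩, c⟩ := p
    simp only [List.foldl_cons]
    set d1 := if x + saj ≥ h_ ∧ y + sbj - bj ≥ h_
      then d.insert (x + aj, y) (d.getD (x + aj, y) 0 + c) else d with hd1
    set d2 := if x + saj - aj ≥ h_ ∧ y + sbj ≥ h_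
      then d1.insert (x, y + bj) (d1.getD (x, y + bj) 0 + c) else d1 with hd2
    have hnd1 : d1.keys.Nodup := by
      rw [hd1]; split_ifs
      · exact PySem.Dict.nodup_keys_insert _ _ _ hd
      · exact hd
    have hnd2 : d2.keys.Nodup := by
      rw [hd2]; split_ifs
      · exact PySem.Dict.nodup_keys_insert _ _ _ hnd1
      · exact hnd1
    have hW1 : pvW g d1 = pvW g d + c * (if x + saj ≥ h_ ∧ y + sbj - bj ≥ h_ then g (x + aj, y) else 0) := by
      rw [hd1]; split_ifs
      · rw [pvW_insert_acc' g d hd]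
      · ring
    have hW2 : pvW g d2 = pvW g d1 + c * (if x + saj - aj ≥ h_ ∧ y + sbj ≥ h_ then g (x, y + bj) else 0) := by
      rw [hd2]; split_ifs
      · rw [pvW_insert_acc' g d1 hnd1]
      · ring
    have hnd3 : (d2.insert (x + aj, y + bj) (d2.getD (x + aj, y + bj) 0 + c)).keys.Nodup :=
      PySem.Dict.nodup_keys_insert _ _ _ hnd2
    have hW3 : pvW g (d2.insert (x + aj, y + bj) (d2.getD (x + aj, y + bj) 0 + c))
        = pvW g d2 + c * g (x + aj, y + bj) := pvW_insert_acc' g d2 hnd2 _ c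
    obtain ⟨ihn, ihw⟩ := ih _ hnd3
    refine ⟨ihn, ?_⟩
    rw [ihw, hW3, hW2, hW1]
    simp only [List.map_cons, List.sum_cons]
    ring

lemma pvF_unfold (n h_ : Int) (a b sa sb : List Int) (j : Int) (hj : j < n)
    (ai bi sai sbi : Int)
    (hai : PySem.List.pyGet? a j = some ai) (hbi : PySem.List.pyGet? b j = some bi)
    (hsai : PySem.List.pyGet? sa j = some sai) (hsbi : PySem.List.pyGet? sb j = some sbi)
    (s : Int × Int) :
    pvF n h_ a b sa sb j s
      = (if s.1 + sai ≥ h_ ∧ s.2 + sbi - bi ≥ h_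
          then pvF n h_ a b sa sb (j + 1) (s.1 + ai, s.2) else 0)
        + (if s.1 + sai - ai ≥ h_ ∧ s.2 + sbi ≥ h_
          then pvF n h_ a b sa sb (j + 1) (s.1, s.2 + bi) else 0)
        + pvF n h_ a b sa sb (j + 1) (s.1 + ai, s.2 + bi) := by
  have hfuel : (n - j).toNat = (n - (j + 1)).toNat + 1 := by omega
  have hne : ¬ j = n := by omega
  rw [pvF, hfuel]
  rw [dfsAux]
  simp only [hne, if_false, hai, hbi, hsai, hsbi]
  simp [pvF]

lemma pvF_base (n h_ : Int) (a b sa sb : List Int) (s : Int × Int) :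
    pvF n h_ a b sa sb n s = if s.1 ≥ h_ ∧ s.2 ≥ h_ then 1 else 0 := by
  rw [pvF, dfsAux.eq_def]
  simp

lemma pvMain (n h_ : Int) (a b sa sb : List Int) :
    ∀ (k : Nat) (j : Int) (d : PySem.Dict (Int × Int) Int), j ≤ n → (n - j).toNat = k →
      (∀ j' ∈ PySem.List.pyRange j n 1,
        PySem.Raise.InRange a.length j' ∧ PySem.Raise.InRange b.length j' ∧
        PySem.Raise.InRange sa.length j' ∧ PySem.Raise.InRange sb.length j') →
      d.keys.Nodup →
      ((dfsLoop n h_ a b sa sb k j d).items.foldl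
        (fun s p => if p.1.1 ≥ h_ ∧ p.1.2 ≥ h_ then s + p.2 else s) 0)
        = pvW (pvF n h_ a b sa sb j) d := by
  intro k
  induction k with
  | zero =>
    intro j d hjn hk _ hd
    have hj : j = n := by omega
    subst hj
    rw [dfsLoop, pvFoldSum, zero_add, pvW]
    congr 1
    apply List.map_congr_left
    intro p _
    rw [pvF_base]
  | succ k ih =>
    intro j d hjn hk hpre hd
    have hj : j < n := by omega
    have hmem : j ∈ PySem.List.pyRange j n 1 := by
      rw [PySem.List.pyRange_one_cons hj]; exact List.mem_cons_self
    obtain ⟨hra, hrb, hrsa, hrsb⟩ := hpre j hmem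
    obtain ⟨ai, hai⟩ := Option.isSome_iff_exists.mp (by
      rw [Option.isSome_iff_ne_none]
      rw [ne_eq, PySem.List.pyGet?_eq_none_iff]
      exact not_not_intro hra)
    obtain ⟨bi, hbi⟩ := Option.isSome_iff_exists.mp (by
      rw [Option.isSome_iff_ne_none]
      rw [ne_eq, PySem.List.pyGet?_eq_none_iff]
      exact not_not_intro hrb)
    obtain ⟨sai, hsai⟩ := Option.isSome_iff_exists.mp (by
      rw [Option.isSome_iff_ne_none]
      rw [ne_eq, PySem.List.pyGet?_eq_none_iff]
      exact not_not_intro hrsa)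
    obtain ⟨sbi, hsbi⟩ := Option.isSome_iff_exists.mp (by
      rw [Option.isSome_iff_ne_none]
      rw [ne_eq, PySem.List.pyGet?_eq_none_iff]
      exact not_not_intro hrsb)
    have hgda : PySem.List.pyGetD a j 0 = ai := by simp [PySem.List.pyGetD, hai]
    have hgdb : PySem.List.pyGetD b j 0 = bi := by simp [PySem.List.pyGetD, hbi]
    have hgdsa : PySem.List.pyGetD sa j 0 = sai := by simp [PySem.List.pyGetD, hsai]
    have hgdsb : PySem.List.pyGetD sb j 0 = sbi := by simp [PySem.List.pyGetD, hsbi]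
    rw [dfsLoop]
    rw [hai, hbi]
    have hstep : dfsStep n h_ a b sa sb d j
        = d.items.foldl (fun nxt p =>
            let x := p.1.1
            let y := p.1.2
            let c := p.2
            let nxt := if x + sai ≥ h_ ∧ y + sbi - bi ≥ h_
              then nxt.insert (x + ai, y) (nxt.getD (x + ai, y) 0 + c) else nxt
            let nxt := if x + sai - ai ≥ h_ ∧ y + sbi ≥ h_
              then nxt.insert (x, y + bi) (nxt.getD (x, y + bi) 0 + c) else nxt
            nxt.insert (x + ai, y + bi) (nxt.getD (x + ai, y + bi) 0 + c)) PySem.Dict.empty := by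
      rw [dfsStep, hgda, hgdb, hgdsa, hgdsb]
    obtain ⟨hnd', hw'⟩ := pvInner h_ ai bi sai sbi (pvF n h_ a b sa sb (j + 1))
      d.items PySem.Dict.empty PySem.Dict.nodup_keys_empty
    have hpre' : ∀ j' ∈ PySem.List.pyRange (j + 1) n 1,
        PySem.Raise.InRange a.length j' ∧ PySem.Raise.InRange b.length j' ∧
        PySem.Raise.InRange sa.length j' ∧ PySem.Raise.InRange sb.length j' := by
      intro j' hj'
      exact hpre j' (by rw [PySem.List.pyRange_one_cons hj]; exact List.mem_cons_of_mem _ hj')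
    rw [ih (j + 1) (dfsStep n h_ a b sa sb d j) (by omega) (by omega) hpre' (hstep ▸ hnd')]
    rw [hstep, hw']
    have hempty : pvW (pvF n h_ a b sa sb (j + 1)) PySem.Dict.empty = 0 := by
      simp [pvW, PySem.Dict.empty]
    rw [hempty, zero_add, pvW]
    congr 1
    apply List.map_congr_left
    intro p _
    rw [pvF_unfold n h_ a b sa sb j hj ai bi sai sbi hai hbi hsai hsbi]

-- ===== VERDICT (by name: the statement is the Claim_ definition above) =====
theorem dfs_spec : Claim_equal_dfs := by
  intro n h_ a b sa sb i h_a h_b _ hpre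
  unfold Spec_dfs
  have hin : i ≤ n := hpre.1
  have hpre2 : ∀ j' ∈ PySem.List.pyRange i n 1,
      PySem.Raise.InRange a.length j' ∧ PySem.Raise.InRange b.length j' ∧
      PySem.Raise.InRange sa.length j' ∧ PySem.Raise.InRange sb.length j' := by
    intro j' hj'
    rw [PySem.List.mem_pyRange_one] at hj'
    obtain ⟨h1, h2, h3, h4, h5, h6, h7, h8⟩ := hpre.2 (by omega)
    exact ⟨⟨by omega, by omega⟩, ⟨by omega, by omega⟩, ⟨by omega, by omega⟩, ⟨by omega, by omega⟩⟩
  have h0 : dfs n h_ a b sa sb i h_a h_b = pvF n h_ a b sa sb i (h_a, h_b) := rfl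
  have hd0 : (PySem.Dict.empty.insert ((h_a, h_b) : Int × Int) (1 : Int)).keys.Nodup :=
    PySem.Dict.nodup_keys_insert _ _ _ PySem.Dict.nodup_keys_empty
  have h1 := pvMain n h_ a b sa sb ((n - i).toNat) i (PySem.Dict.empty.insert (h_a, h_b) 1) hin rfl hpre2 hd0
  have h2 : dfs_alt n h_ a b sa sb i h_a h_b
      = (dfsLoop n h_ a b sa sb ((n - i).toNat) i (PySem.Dict.empty.insert (h_a, h_b) 1)).items.foldl
        (fun s p => if p.1.1 ≥ h_ ∧ p.1.2 ≥ h_ then s + p.2 else s) 0 := rfl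
  rw [h0, h2, h1]
  simp [pvW, PySem.Dict.insert, PySem.Dict.contains, PySem.Dict.empty]
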